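-- pv_equiv track=rewrite | github.com/aamtzl08/codewars | persistent_minev2.py | persistent
-- ===== SOURCE A (Python) =====
-- def persistent(n):
--     times = 0
--     l = str(n)
--     if len(l) <= 1:
--         return times
--     else:
--         while len(l) > 1:
--             num = 1
--             for c in l:
--                 num *= int(c)
--             l = str(num)
--             times += 1
--         return times
-- ===== SOURCE B (Python) =====
-- def persistent(n):
--     s = str(n)
--     if len(s) <= 1:
--         return 0
--     prod = 1
--     for c in s:
--         prod *= int(c)
--     return 1 + persistent(prod)
-- ===== Notes on version B (the rewrite author's own statement) =====
-- stated objective: alternative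
-- what changed: Replaces A's while-loop with a counter and mutable string state by direct recursion on the digit product (one step counted per recursive call on the digit product).
import Mathlib
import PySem

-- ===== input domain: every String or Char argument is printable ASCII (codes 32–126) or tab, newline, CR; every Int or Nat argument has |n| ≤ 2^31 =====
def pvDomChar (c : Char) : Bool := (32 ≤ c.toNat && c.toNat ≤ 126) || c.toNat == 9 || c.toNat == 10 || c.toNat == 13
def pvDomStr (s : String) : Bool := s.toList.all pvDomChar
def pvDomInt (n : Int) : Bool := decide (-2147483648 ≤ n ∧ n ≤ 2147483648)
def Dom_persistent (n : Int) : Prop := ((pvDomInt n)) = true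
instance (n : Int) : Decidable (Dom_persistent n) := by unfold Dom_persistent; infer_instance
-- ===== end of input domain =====

-- B replaces A's while-loop with counter/string state by direct recursion on the digit product; equal on all n ≥ 0 (both raise ValueError on negative n).

-- digit product of the character list: num = 1; for c in l: num *= int(c)
-- (int(c) ported via PySem.Int.ofStr?; the .getD 0 arm is unreachable inside Pre_, where every char is a digit)
def pvDigitProd (l : List Char) : Int :=
  l.foldl (fun acc c => acc * ((PySem.Int.ofStr? (String.mk [c])).getD 0)) 1

-- ===== PORT A =====
-- while len(l) > 1: num = prod of digits; l = str(num); times += 1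
-- fuel n.toNat + 1 suffices: for n ≥ 10 the digit product is < n, so values strictly decrease
def persistentLoop (fuel : Nat) (l : List Char) (times : Int) : Int :=
  match fuel with
  | 0 => times
  | fuel + 1 =>
    if l.length > 1 then
      persistentLoop fuel (PySem.Int.toChars (pvDigitProd l)) (times + 1)
    else times

def persistent (n : Int) : Int :=
  let times : Int := 0
  let l := PySem.Int.toChars n
  if l.length ≤ 1 then times
  else persistentLoop (n.toNat + 1) l times

-- ===== PORT B =====
-- s = str(n); if len(s) <= 1: return 0; prod = digit product; return 1 + persistent(prod)
def persistentAltRec (fuel : Nat) (n : Int) : Int :=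
  match fuel with
  | 0 => 0
  | fuel + 1 =>
    let s := PySem.Int.toChars n
    if s.length ≤ 1 then 0
    else 1 + persistentAltRec fuel (pvDigitProd s)

def persistent_alt (n : Int) : Int := persistentAltRec (n.toNat + 1) n

-- ===== PRECONDITION & SPEC =====
-- Pre_ excludes negative n, on which both Pythons raise ValueError (int('-')).
def Pre_persistent (n : Int) : Prop := 0 ≤ n
instance (n : Int) : Decidable (Pre_persistent n) := by unfold Pre_persistent; infer_instance
def pvWitness_persistent : Int := (39)

def Spec_persistent (n : Int) (out : Int) : Prop := out = persistent_alt n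
instance (n : Int) (out : Int) : Decidable (Spec_persistent n out) := by unfold Spec_persistent; infer_instance

-- ===== CLAIM (what is proved, stated in full; the proofs are below) =====
def Claim_equal_persistent : Prop := ∀ (n : Int), Dom_persistent n → Pre_persistent n → Spec_persistent n (persistent n)

-- ===== LEMMAS AND PROOFS =====
theorem loop_eq_rec (fuel : Nat) : ∀ (n times : Int),
    persistentLoop fuel (PySem.Int.toChars n) times = times + persistentAltRec fuel n := by
  induction fuel with
  | zero => intro n times; simp [persistentLoop, persistentAltRec]
  | succ fuel ih =>
    intro n times
    simp only [persistentLoop, persistentAltRec]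
    by_cases h : (PySem.Int.toChars n).length ≤ 1
    · simp [h, Nat.lt_iff_add_one_le]
    · have h' : (PySem.Int.toChars n).length > 1 := by omega
      simp only [if_pos h', if_neg h, ih]
      ring

-- ===== VERDICT (by name: the statement is the Claim_ definition above) =====
theorem persistent_spec : Claim_equal_persistent := by
  intro n _ _
  unfold Spec_persistent persistent persistent_alt
  by_cases h : (PySem.Int.toChars n).length ≤ 1
  · simp [h, persistentAltRec]
  · simp only [if_neg h, loop_eq_rec, zero_add]
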